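-- pv_equiv track=rewrite | github.com/readable-ko/ProblemSolving | 프로그래머스/lv1/17681. ［1차］ 비밀지도/［1차］ 비밀지도.py | solution
-- ===== SOURCE A (Python) =====
-- def solution(n, arr1, arr2):
--     answer = []
--
--     for idx in range(len(arr1)):
--         bit_checker = (1 << n - 1)
--         num1 = arr1[idx]
--         num2 = arr2[idx]
--         l = ""
--         while bit_checker != 0:
--             if num1 & bit_checker == bit_checker:
--                 l += "#"
--             elif num2 & bit_checker == bit_checker:
--                 l += "#"
--             else:
--                 l += ' '
--             bit_checker = bit_checker >> 1
--         answer.append(l)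
--     return answer
-- ===== SOURCE B (Python) =====
-- def solution(n, arr1, arr2):
--     tr = str.maketrans('10', '# ')
--     return [format((a | b) & ((1 << n) - 1), 'b').zfill(n).translate(tr)
--             for a, b in zip(arr1, arr2)]
-- ===== Notes on version B (the rewrite author's own statement) =====
-- stated objective: idiomatic
-- what changed: Replaces A's hand-rolled high-to-low bit-mask while-loop with OR, mask to the low n bits, binary formatting with zero-padding, and a character translation '1'->'#', '0'->' '.
import Mathlib
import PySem

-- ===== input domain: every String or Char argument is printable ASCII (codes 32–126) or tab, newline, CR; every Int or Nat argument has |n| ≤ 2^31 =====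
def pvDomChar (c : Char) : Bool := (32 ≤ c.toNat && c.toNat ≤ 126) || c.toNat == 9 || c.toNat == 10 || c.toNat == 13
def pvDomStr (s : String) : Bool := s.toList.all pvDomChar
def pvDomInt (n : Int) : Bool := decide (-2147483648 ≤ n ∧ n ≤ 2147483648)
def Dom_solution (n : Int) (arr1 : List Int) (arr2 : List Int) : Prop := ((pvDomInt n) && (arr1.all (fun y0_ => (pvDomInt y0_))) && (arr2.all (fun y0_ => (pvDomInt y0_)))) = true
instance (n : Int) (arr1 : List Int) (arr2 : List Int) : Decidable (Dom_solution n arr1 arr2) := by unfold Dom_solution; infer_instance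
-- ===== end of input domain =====

-- B replaces A's hand-rolled high-to-low bit-mask while-loop by OR + mask + binary formatting + character substitution (idiomatic; same cost).

-- ===== PORT A =====
-- the 'while bit_checker != 0' loop;  'l += c' on strings is ported over List Char;  'bit_checker >> 1' is 'bc / 2';
-- Python '&' on ints (two's complement) is Int.land
def pvRowA (num1 num2 : Int) (bc : Nat) (l : List Char) : List Char :=
  if _h : bc = 0 then l
  else
    pvRowA num1 num2 (bc / 2)
      (if Int.land num1 (bc : Int) = (bc : Int) then l ++ ['#']
       else if Int.land num2 (bc : Int) = (bc : Int) then l ++ ['#']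
       else l ++ [' '])
termination_by bc
decreasing_by exact Nat.div_lt_self (Nat.pos_of_ne_zero _h) (by omega)

def solution (n : Int) (arr1 : List Int) (arr2 : List Int) : List String :=
  (List.range arr1.length).foldl
    (fun (answer : List String) (idx : Nat) =>
      -- bit_checker = 1 << (n - 1): exact for n ≥ 1; Python raises ValueError for n ≤ 0 (excluded by Pre_ when the loop runs)
      let bc : Nat := 2 ^ (n - 1).toNat
      -- arr1[idx] is always in range; arr2[idx] raising IndexError (pyGet? = none) is excluded by Pre_
      let num1 := (PySem.List.pyGet? arr1 (idx : Int)).getD 0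
      let num2 := (PySem.List.pyGet? arr2 (idx : Int)).getD 0
      answer ++ [String.mk (pvRowA num1 num2 bc [])])
    []

-- ===== PORT B =====
-- format(v, 'b') for v > 0: binary digits, most significant first
def pvBinDigits : Nat → List Char
  | 0 => []
  | v + 1 => pvBinDigits ((v + 1) / 2) ++ [if (v + 1) % 2 = 1 then '1' else '0']

def pvFormatBin (v : Nat) : List Char := if v = 0 then ['0'] else pvBinDigits v

def pvZfill (w : Nat) (s : List Char) : List Char := List.replicate (w - s.length) '0' ++ s

-- str.maketrans('10', '# '): per-character translation
def pvTr (c : Char) : Char := if c = '1' then '#' else if c = '0' then ' ' else c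

def solution_alt (n : Int) (arr1 : List Int) (arr2 : List Int) : List String :=
  -- (1 << n) - 1: exact for n ≥ 0 (Python raises for n < 0, excluded by Pre_ when a row exists);
  -- Python '|' and '&' on ints (two's complement) are Int.lor / Int.land
  (List.zip arr1 arr2).map fun p =>
    String.mk ((pvZfill n.toNat (pvFormatBin
      (Int.land (Int.lor p.1 p.2) (((2 ^ n.toNat : Nat) : Int) - 1)).toNat)).map pvTr)

-- ===== PRECONDITION & SPEC =====
-- Pre_ excludes exactly the inputs where Python A raises: with a nonempty arr1, n ≤ 0 makes
-- '1 << n - 1' raise ValueError and len(arr2) < len(arr1) makes 'arr2[idx]' raise IndexError.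
def Pre_solution (n : Int) (arr1 : List Int) (arr2 : List Int) : Prop :=
  arr1 ≠ [] → (1 ≤ n ∧ arr1.length ≤ arr2.length)
instance (n : Int) (arr1 : List Int) (arr2 : List Int) : Decidable (Pre_solution n arr1 arr2) := by unfold Pre_solution; infer_instance

def pvWitness_solution : Int × List Int × List Int := (3, [9, 20], [30, 1])

def Spec_solution (n : Int) (arr1 : List Int) (arr2 : List Int) (out : List String) : Prop := out = solution_alt n arr1 arr2
instance (n : Int) (arr1 : List Int) (arr2 : List Int) (out : List String) : Decidable (Spec_solution n arr1 arr2 out) := by unfold Spec_solution; infer_instance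

-- ===== CLAIM (what is proved, stated in full; the proofs are below) =====
def Claim_equal_solution : Prop := ∀ (n : Int) (arr1 : List Int) (arr2 : List Int), Dom_solution n arr1 arr2 → Pre_solution n arr1 arr2 → Spec_solution n arr1 arr2 (solution n arr1 arr2)

-- ===== LEMMAS AND PROOFS =====

theorem pv_foldl_append {α β : Type} (g : α → β) :
    ∀ (l : List α) (acc : List β), l.foldl (fun acc i => acc ++ [g i]) acc = acc ++ l.map g := by
  intro l
  induction l with
  | nil => simp
  | cons x xs ih => intro acc; simp [List.foldl, ih]

theorem pv_land_pow (a : Int) (k : Nat) :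
    (Int.land a ((2 ^ k : Nat) : Int) = ((2 ^ k : Nat) : Int)) ↔ a.testBit k = true := by
  cases a with
  | ofNat m =>
    show ((Nat.land m (2^k) : Nat) : Int) = ((2^k : Nat) : Int) ↔ Nat.testBit m k = true
    rw [Int.natCast_inj]
    have h : m &&& 2^k = (Nat.testBit m k).toNat * 2^k := Nat.and_two_pow m k
    rw [show Nat.land m (2^k) = m &&& 2^k from rfl, h]
    cases hb : Nat.testBit m k
    · simp only [Bool.toNat_false, Nat.zero_mul, Bool.false_eq_true, iff_false]
      exact (Nat.two_pow_pos k).ne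
    · simp
  | negSucc m =>
    show ((Nat.ldiff (2^k) m : Nat) : Int) = ((2^k : Nat) : Int) ↔ (!Nat.testBit m k) = true
    rw [Int.natCast_inj]
    cases hb : Nat.testBit m k
    · simp only [Bool.not_false, iff_true]
      apply Nat.eq_of_testBit_eq
      intro i
      rw [Nat.testBit_ldiff]
      by_cases hi : i = k
      · subst hi; simp [hb, Nat.testBit_two_pow]
      · simp only [Nat.testBit_two_pow]
        simp [show ¬ (k = i) from fun h => hi h.symm]
    · simp only [Bool.not_true, Bool.false_eq_true, iff_false]
      intro h
      have := congrArg (fun x => Nat.testBit x k) h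
      simp [Nat.testBit_ldiff, Nat.testBit_two_pow, hb] at this

theorem pv_land_mask (c : Int) (t : Nat) :
    ∃ w : Nat, Int.land c (((2 ^ t : Nat) : Int) - 1) = (w : Int) ∧ w < 2 ^ t ∧
      ∀ i, i < t → w.testBit i = c.testBit i := by
  have hcast : (((2 ^ t : Nat) : Int) - 1) = ((2 ^ t - 1 : Nat) : Int) := by
    have := Nat.one_le_two_pow (n := t); push_cast [this]; ring
  rw [hcast]
  have hm : 2 ^ t - 1 < 2 ^ t := by have := Nat.two_pow_pos t; omega
  cases c with
  | ofNat m =>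
    refine ⟨m &&& (2 ^ t - 1), rfl, Nat.and_lt_two_pow m hm, ?_⟩
    intro i hi
    show (m &&& (2^t-1)).testBit i = Nat.testBit m i
    rw [Nat.testBit_and, Nat.testBit_two_pow_sub_one]
    simp [hi]
  | negSucc m =>
    refine ⟨Nat.ldiff (2 ^ t - 1) m, rfl, ?_, ?_⟩
    · have heq : Nat.ldiff (2 ^ t - 1) m = (Nat.ldiff (2 ^ t - 1) m) &&& (2 ^ t - 1) := by
        apply Nat.eq_of_testBit_eq
        intro i
        rw [Nat.testBit_and, Nat.testBit_ldiff, Nat.testBit_two_pow_sub_one]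
        cases hd : (decide (i < t)) <;> simp [hd]
      rw [heq]
      exact Nat.and_lt_two_pow _ hm
    · intro i hi
      show (Nat.ldiff (2^t-1) m).testBit i = (!Nat.testBit m i)
      rw [Nat.testBit_ldiff, Nat.testBit_two_pow_sub_one]
      simp [hi]

theorem pvRowA_spec (a b : Int) (k : Nat) : ∀ (acc : List Char),
    pvRowA a b (2 ^ k) acc
      = acc ++ (List.range (k + 1)).reverse.map
          (fun i => if a.testBit i || b.testBit i then '#' else ' ') := by
  induction k with
  | zero =>
    intro acc
    rw [pvRowA]
    have ha := pv_land_pow a 0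
    have hb := pv_land_pow b 0
    norm_num at ha hb ⊢
    rw [pvRowA]
    cases hta : a.testBit 0 <;> cases htb : b.testBit 0 <;> simp [hta, htb] at ha hb <;>
      simp [ha, hb]
  | succ k ih =>
    intro acc
    rw [pvRowA]
    have hne : (2:Nat) ^ (k+1) ≠ 0 := (Nat.two_pow_pos (k+1)).ne'
    have hdiv : (2:Nat) ^ (k+1) / 2 = 2 ^ k := by
      rw [pow_succ, Nat.mul_div_cancel _ (by norm_num)]
    simp only [hne, dif_neg, if_neg, hdiv, ih]
    have ha := pv_land_pow a (k+1)
    have hb := pv_land_pow b (k+1)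
    have hrange : (List.range (k+1+1)).reverse
        = (k+1) :: (List.range (k+1)).reverse := by
      rw [List.range_succ, List.reverse_append]; rfl
    rw [hrange]
    cases hta : a.testBit (k+1) <;> cases htb : b.testBit (k+1) <;>
      simp [hta, htb] at ha hb <;> simp [ha, hb, hta, htb]

theorem pvBinDigits_len (t : Nat) : ∀ v, v < 2 ^ t → (pvBinDigits v).length ≤ t := by
  induction t with
  | zero => intro v hv; interval_cases v; simp [pvBinDigits]
  | succ t ih =>
    intro v hv
    match v with
    | 0 => simp [pvBinDigits]
    | w + 1 =>
      rw [pvBinDigits]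
      have := ih ((w+1)/2) (by rw [pow_succ] at hv; omega)
      simp only [List.length_append, List.length_singleton]
      omega

theorem pv_range_rev_split (k : Nat) (f : Nat → Char) :
    (List.range (k+1)).reverse.map f
      = ((List.range k).reverse.map (fun i => f (i+1))) ++ [f 0] := by
  rw [List.range_succ_eq_map]
  simp [List.map_reverse, List.map_map, Function.comp_def, Nat.succ_eq_add_one]

theorem pvBinDigits_spec (k : Nat) : ∀ v, 2 ^ k ≤ v → v < 2 ^ (k + 1) →
    pvBinDigits v = (List.range (k + 1)).reverse.map (fun i => if v.testBit i then '1' else '0') := by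
  induction k with
  | zero =>
    intro v h1 h2
    have : v = 1 := by norm_num at h1 h2; omega
    subst this
    rw [pvBinDigits]
    simp [pvBinDigits]
  | succ k ih =>
    intro v h1 h2
    have hv2 : 1 ≤ v := le_trans (Nat.one_le_two_pow) h1
    obtain ⟨w, rfl⟩ : ∃ w, v = w + 1 := ⟨v - 1, by omega⟩
    rw [pvBinDigits]
    have hd : (w+1)/2 < 2 ^ (k+1) := by rw [pow_succ] at h2; omega
    have hd1 : 2 ^ k ≤ (w+1)/2 := by rw [pow_succ] at h1; omega
    rw [ih _ hd1 hd, pv_range_rev_split (k+1)]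
    congr 1
    · apply List.map_congr_left
      intro i _
      rw [Nat.testBit_div_two]
    · simp [Nat.testBit_zero]

theorem pvPad_spec (t : Nat) (ht : 1 ≤ t) : ∀ v, v < 2 ^ t →
    pvZfill t (pvFormatBin v) = (List.range t).reverse.map (fun i => if v.testBit i then '1' else '0') := by
  induction t with
  | zero => omega
  | succ t ih =>
    intro v hv
    by_cases h0 : t = 0
    · subst h0
      norm_num at hv
      interval_cases v <;> simp [pvZfill, pvFormatBin, pvBinDigits, List.range_succ]
    · by_cases hlow : v < 2 ^ t
      · have hrec := ih (by omega) v hlow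
        have hlen : (pvFormatBin v).length ≤ t := by
          by_cases hz : v = 0
          · subst hz; simp [pvFormatBin]; omega
          · simpa [pvFormatBin, hz] using pvBinDigits_len t v hlow
        have hstep : pvZfill (t+1) (pvFormatBin v)
            = '0' :: pvZfill t (pvFormatBin v) := by
          unfold pvZfill
          have : t + 1 - (pvFormatBin v).length = (t - (pvFormatBin v).length) + 1 := by omega
          rw [this, List.replicate_succ, List.cons_append]
        rw [hstep, hrec, List.range_succ, List.reverse_append]
        simp [Nat.testBit_lt_two_pow hlow]
      · have h1 : 2 ^ t ≤ v := by omega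
        have hnz : v ≠ 0 := by have := Nat.two_pow_pos t; omega
        have hgo := pvBinDigits_spec t v h1 hv
        have hlen : (pvBinDigits v).length = t + 1 := by simp [hgo]
        unfold pvZfill
        simp [pvFormatBin, hnz, hlen, hgo]

theorem pv_rows_eq (a b : Int) (k : Nat) :
    pvRowA a b (2 ^ k) []
      = (pvZfill (k+1) (pvFormatBin (Int.land (Int.lor a b) (((2 ^ (k+1) : Nat) : Int) - 1)).toNat)).map
          (fun c => if c = '1' then '#' else if c = '0' then ' ' else c) := by
  obtain ⟨w, hw, hwlt, hbits⟩ := pv_land_mask (Int.lor a b) (k+1)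
  rw [hw, Int.toNat_natCast]
  rw [pvPad_spec (k+1) (by omega) w hwlt]
  rw [pvRowA_spec, List.nil_append, List.map_map]
  apply List.map_congr_left
  intro i hi
  have hilt : i < k + 1 := by
    have := List.mem_reverse.mp hi
    exact List.mem_range.mp this
  have := hbits i hilt
  rw [Int.testBit_lor] at this
  simp only [Function.comp_def]
  rw [this]
  cases a.testBit i <;> cases b.testBit i <;> simp

-- ===== VERDICT (by name: the statement is the Claim_ definition above) =====
theorem solution_spec : Claim_equal_solution := by
  intro n arr1 arr2 _hdom hpre
  show solution n arr1 arr2 = solution_alt n arr1 arr2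
  rcases List.eq_nil_or_concat' arr1 with h1 | _
  · subst h1; rfl
  have hne : arr1 ≠ [] := by rintro rfl; simp_all
  obtain ⟨hn, hlen⟩ := hpre hne
  have hk : n.toNat = (n - 1).toNat + 1 := by omega
  unfold solution solution_alt
  rw [pv_foldl_append, List.nil_append]
  apply List.ext_getElem
  · simp [List.length_zip]; omega
  intro i hi1 hi2
  simp only [List.getElem_map, List.getElem_range, List.getElem_zip]
  have hi : i < arr1.length := by simpa using hi1
  have hi2' : i < arr2.length := lt_of_lt_of_le hi hlen
  have hget1 : (PySem.List.pyGet? arr1 (i : Int)).getD 0 = arr1[i] := by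
    rw [PySem.List.pyGet?_natCast, List.getElem?_eq_getElem hi]; rfl
  have hget2 : (PySem.List.pyGet? arr2 (i : Int)).getD 0 = arr2[i] := by
    rw [PySem.List.pyGet?_natCast, List.getElem?_eq_getElem hi2']; rfl
  simp only [hget1, hget2, hk]
  rw [pv_rows_eq]
  rfl
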